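-- pv_equiv track=rewrite | github.com/KimDeokjung/AlgorithmProblem | codingTest/230708/3.py | solution
-- ===== SOURCE A (Python) =====
-- def solution(merchantNames):
--     answer = []
--     totalAnswer = []
--     hardSet = ["&", "(", ")", ".", ",", "-"]
--
--     for merchantName in merchantNames:
--         if len(answer) == 0:
--             flag = False
--             for x in merchantName:
--                 if x in hardSet:
--                     flag = True
--                     break
--             answer.append([merchantName, flag])
--             continue
--         masterFlag = True
--
--         for x in range(len(answer)):
--             flag = True
--             beforeHardFlag = False
--             hardFlag = False
--             lenFlag = min(len(answer[x][0]), len(merchantName))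
--             flagX = flagMerchant = 0
--
--             while flagX != lenFlag and flagMerchant != lenFlag:
--                 if merchantName[flagMerchant] in hardSet:
--                     hardFlag = True
--                     flagMerchant += 1
--                     continue
--                 if answer[x][0][flagX] in hardSet:
--                     beforeHardFlag = True
--                     flagX += 1
--                     continue
--                 if merchantName[flagMerchant] == " ":
--                     flagMerchant += 1
--                     continue
--                 if answer[x][0][flagX] == " ":
--                     flagX += 1
--                     continue
--
--                 if answer[x][0][flagX] != merchantName[flagMerchant]:
--                     flag = False
--                     break
--                 flagX += 1
--                 flagMerchant += 1
--
--             for y in range(flagX, lenFlag):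
--                 if answer[x][0][y] in hardSet: beforeHardFlag = True
--             for y in range(flagMerchant, lenFlag):
--                 if merchantName[y] in hardSet: hardFlag = True
--
--             if flag:
--                 masterFlag = False
--                 if hardFlag and not beforeHardFlag:
--                     answer[x][0] = merchantName
--                     answer[x][1] = True
--                     break
--
--                 if len(merchantName) > len(answer[x][0]):
--                     answer[x][0] = merchantName
--                     break
--
--         if masterFlag:
--             flag = False
--             for x in merchantName:
--                 if x in hardSet:
--                     flag = True
--                     break
--
--             answer.append([merchantName, flag])
--
--
--     for x in range(len(answer)):
--         flag = False
--         maxLen = 0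
--         point = 0
--         for y in range(len(answer)):
--             if flag == False and answer[y][1] == True:
--                 point = y
--                 flag = True
--                 maxLen = len(answer[y][0])
--             elif flag == True and answer[y][1] == True and maxLen < len(answer[y][0]):
--                 maxLen = len(answer[y][0])
--                 point = y
--             elif flag == False and answer[y][1] == False and maxLen < len(answer[y][0]):
--                 maxLen = len(answer[y][0])
--                 point = y
--         totalAnswer.append(answer[point][0])
--         answer[point][0] = ""
--         answer[point][1] = False
--
--     return totalAnswer
-- ===== SOURCE B (Python) =====
-- HARD = set("&().,-")
--
--
-- def _sig(s):
--     # significant characters: hard symbols and spaces removed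
--     return [c for c in s if c not in HARD and c != " "]
--
--
-- def solution(merchantNames):
--     answer = []  # list of (name, flag) pairs
--     for name in merchantNames:
--         matched = False
--         i = 0
--         while i < len(answer):
--             prev, pflag = answer[i]
--             m = min(len(prev), len(name))
--             if all(a == b for a, b in zip(_sig(prev[:m]), _sig(name[:m]))):
--                 matched = True
--                 hardN = any(c in HARD for c in name[:m])
--                 hardP = any(c in HARD for c in prev[:m])
--                 if hardN and not hardP:
--                     answer[i] = (name, True)
--                     break
--                 if len(name) > len(prev):
--                     answer[i] = (name, pflag)
--                     break
--             i += 1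
--         if not matched:
--             answer.append((name, any(c in HARD for c in name)))
--     ordered = sorted(answer, key=lambda e: (not e[1], -len(e[0])))
--     return [e[0] for e in ordered]
-- ===== Notes on version B (the rewrite author's own statement) =====
-- stated objective: alternative
-- what changed: B replaces A's two-pointer skip-and-compare while loop by a declarative comparison of the hard/space-filtered prefixes (zip of filtered strings), and replaces A's quadratic repeated-selection output phase by one stable sort of the collected entries by the key (not flag, -len(name)).
import Mathlib
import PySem

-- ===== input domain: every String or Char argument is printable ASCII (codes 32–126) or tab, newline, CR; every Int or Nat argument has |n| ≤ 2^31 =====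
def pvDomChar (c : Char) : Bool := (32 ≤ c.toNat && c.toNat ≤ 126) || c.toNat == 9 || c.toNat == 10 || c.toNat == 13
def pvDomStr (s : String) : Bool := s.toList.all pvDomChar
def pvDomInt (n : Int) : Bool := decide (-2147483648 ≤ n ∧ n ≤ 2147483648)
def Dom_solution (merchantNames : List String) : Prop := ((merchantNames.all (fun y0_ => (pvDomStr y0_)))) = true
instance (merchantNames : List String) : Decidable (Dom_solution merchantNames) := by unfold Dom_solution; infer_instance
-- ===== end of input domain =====

-- B replaces A's two-pointer fuzzy comparison by a declarative filtered-prefix comparison and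
-- A's quadratic repeated-selection output loop by one stable sort (objective: alternative/simpler tail).

-- ===== PORT A =====
def pvHardSet : List Char := ['&', '(', ')', '.', ',', '-']

-- the character-by-character while loop of A; returns (flag, beforeHardFlag, hardFlag, flagX, flagMerchant)
def pvAWhile (prev name : List Char) (m i j : Nat) (bh hf : Bool) : Bool × Bool × Bool × Nat × Nat :=
  if h : i < m ∧ j < m then
    if pvHardSet.contains (name.getD j ' ') then pvAWhile prev name m i (j+1) bh true
    else if pvHardSet.contains (prev.getD i ' ') then pvAWhile prev name m (i+1) j true hf
    else if name.getD j ' ' = ' ' then pvAWhile prev name m i (j+1) bh hf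
    else if prev.getD i ' ' = ' ' then pvAWhile prev name m (i+1) j bh hf
    else if prev.getD i ' ' ≠ name.getD j ' ' then (false, bh, hf, i, j)
    else pvAWhile prev name m (i+1) (j+1) bh hf
  else (true, bh, hf, i, j)
termination_by (m - i) + (m - j)
decreasing_by all_goals omega

-- 'for y in range(a, m): if s[y] in hardSet: fl = True'
def pvAScanHard (s : List Char) (a m : Nat) (acc : Bool) : Bool :=
  (List.range' a (m - a)).foldl (fun fl y => if pvHardSet.contains (s.getD y ' ') then true else fl) acc

-- 'for x in merchantName: if x in hardSet: flag = True; break'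
def pvAFirstHard (name : List Char) : Bool := name.any (fun c => pvHardSet.contains c)

-- the 'for x in range(len(answer))' loop of A's first phase; returns (answer, masterFlag)
def pvAInner (name : List Char) (answer : List (List Char × Bool)) (x : Nat) (master : Bool) :
    List (List Char × Bool) × Bool :=
  if h : x < answer.length then
    let e := answer[x]
    let m := min e.1.length name.length
    let r := pvAWhile e.1 name m 0 0 false false
    let bh := pvAScanHard e.1 r.2.2.2.1 m r.2.1
    let hf := pvAScanHard name r.2.2.2.2 m r.2.2.1
    if r.1 then
      if hf && !bh then (answer.set x (name, true), false)
      else if name.length > e.1.length then (answer.set x (name, e.2), false)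
      else pvAInner name answer (x+1) false
    else pvAInner name answer (x+1) master
  else (answer, master)
termination_by answer.length - x
decreasing_by all_goals simp_all; omega

-- A's first phase: the outer 'for merchantName in merchantNames' loop
def pvAPhase1 (answer : List (List Char × Bool)) (names : List (List Char)) : List (List Char × Bool) :=
  match names with
  | [] => answer
  | name :: rest =>
    if answer.length = 0 then pvAPhase1 (answer ++ [(name, pvAFirstHard name)]) rest
    else
      let r := pvAInner name answer 0 true
      if r.2 then pvAPhase1 (r.1 ++ [(name, pvAFirstHard name)]) rest
      else pvAPhase1 r.1 rest

-- the 'for y in range(len(answer))' selection scan of A's second phase; state (flag, maxLen, point)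
def pvAScanStep (s : Bool × Nat × Nat) (ye : (List Char × Bool) × Nat) : Bool × Nat × Nat :=
  if !s.1 && ye.1.2 then (true, ye.1.1.length, ye.2)
  else if s.1 && ye.1.2 && decide (s.2.1 < ye.1.1.length) then (true, ye.1.1.length, ye.2)
  else if !s.1 && !ye.1.2 && decide (s.2.1 < ye.1.1.length) then (false, ye.1.1.length, ye.2)
  else s

def pvAScan (answer : List (List Char × Bool)) : Bool × Nat × Nat :=
  answer.zipIdx.foldl pvAScanStep (false, 0, 0)

-- A's second phase: 'for x in range(len(answer))', emit answer[point], blank it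
def pvAPhase2 (answer : List (List Char × Bool)) (k : Nat) (total : List (List Char)) : List (List Char) :=
  match k with
  | 0 => total
  | k+1 =>
    let pt := (pvAScan answer).2.2
    pvAPhase2 (answer.set pt ([], false)) k (total ++ [(answer.getD pt ([], false)).1])

def solution (merchantNames : List String) : List String :=
  let answer := pvAPhase1 [] (merchantNames.map String.toList)
  (pvAPhase2 answer answer.length []).map (fun cs => String.ofList cs)

-- ===== PORT B =====
def pvHARD : PySem.Set Char := PySem.Set.ofList "&().,-".toList

-- significant characters: hard symbols and spaces removed
def pvSig (s : List Char) : List Char := s.filter (fun c => !(pvHARD.contains c) && !(c == ' '))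

-- B's 'while i < len(answer)' loop; returns (answer, matched)
def pvBLoop (name : List Char) (answer : List (List Char × Bool)) (i : Nat) (matched : Bool) :
    List (List Char × Bool) × Bool :=
  if h : i < answer.length then
    let e := answer[i]
    let m := min e.1.length name.length
    if ((pvSig (e.1.take m)).zip (pvSig (name.take m))).all (fun ab => ab.1 == ab.2) then
      let hardN := (name.take m).any (fun c => pvHARD.contains c)
      let hardP := (e.1.take m).any (fun c => pvHARD.contains c)
      if hardN && !hardP then (answer.set i (name, true), true)
      else if name.length > e.1.length then (answer.set i (name, e.2), true)
      else pvBLoop name answer (i+1) true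
    else pvBLoop name answer (i+1) matched
  else (answer, matched)
termination_by answer.length - i
decreasing_by all_goals simp_all; omega

def pvBStep (answer : List (List Char × Bool)) (name : List Char) : List (List Char × Bool) :=
  let r := pvBLoop name answer 0 false
  if r.2 then r.1 else r.1 ++ [(name, name.any (fun c => pvHARD.contains c))]

def solution_alt (merchantNames : List String) : List String :=
  let answer := (merchantNames.map String.toList).foldl pvBStep []
  (PySem.List.sorted2 answer (fun e => if e.2 then (0 : Int) else 1)
      (fun e => -(e.1.length : Int))).map (fun e => String.ofList e.1)

-- ===== PRECONDITION & SPEC =====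
def Spec_solution (merchantNames : List String) (out : List String) : Prop := out = solution_alt merchantNames
instance (merchantNames : List String) (out : List String) : Decidable (Spec_solution merchantNames out) := by unfold Spec_solution; infer_instance

-- ===== CLAIM (what is proved, stated in full; the proofs are below) =====
def Claim_equal_solution : Prop := ∀ (merchantNames : List String), Dom_solution merchantNames → Spec_solution merchantNames (solution merchantNames)

-- ===== LEMMAS AND PROOFS =====

theorem pv_hard_eq : pvHARD = pvHardSet := by decide

theorem pv_hard_fun_eq : (fun c => pvHARD.contains c) = (fun c => pvHardSet.contains c) := by
  rw [pv_hard_eq]; funext c; simp [PySem.Set.contains]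

theorem pv_seg_cons (l : List Char) (m i : Nat) (him : i < m) (hm : m ≤ l.length) :
    (l.take m).drop i = l.getD i ' ' :: (l.take m).drop (i+1) := by
  have h1 : i < (l.take m).length := by simp [List.length_take]; omega
  have h2 : i < l.length := by omega
  rw [List.drop_eq_getElem_cons h1, List.getElem_take, List.getD_eq_getElem _ _ h2]

theorem pv_seg_nil (l : List Char) (m : Nat) (hm : m ≤ l.length) :
    (l.take m).drop m = [] := by
  apply List.drop_eq_nil_of_le
  simp [List.length_take]

theorem pv_scan_spec (s : List Char) (m : Nat) (hm : m ≤ s.length) :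
    ∀ n a acc, m - a = n → a ≤ m →
    pvAScanHard s a m acc = (acc || ((s.take m).drop a).any (fun c => pvHardSet.contains c)) := by
  intro n
  induction n with
  | zero =>
    intro a acc h0 ha
    have haa : a = m := by omega
    subst haa
    simp [pvAScanHard, pv_seg_nil s a hm]
  | succ n ih =>
    intro a acc hr ha
    have ham : a < m := by omega
    rw [pv_seg_cons s m a ham hm]
    unfold pvAScanHard
    rw [hr, List.range'_succ, List.foldl_cons]
    have hrec := ih (a+1) (if pvHardSet.contains (s.getD a ' ') then true else acc) (by omega) (by omega)
    unfold pvAScanHard at hrec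
    rw [show m - (a+1) = n from by omega] at hrec
    rw [hrec, List.any_cons]
    cases hda : pvHardSet.contains (s.getD a ' ') <;> cases acc <;> simp

theorem pvSig_cons (c : Char) (t : List Char) :
    pvSig (c :: t) = if pvHardSet.contains c || c == ' ' then pvSig t else c :: pvSig t := by
  simp only [pvSig, List.filter_cons, pv_hard_eq]
  cases h1 : pvHardSet.contains c <;> cases h2 : c == ' ' <;> simp [h1, h2] <;> simp_all

theorem pv_while_spec (prev name : List Char) (m : Nat) (hp : m ≤ prev.length) (hn : m ≤ name.length) :
    ∀ (i j : Nat) (bh hf : Bool), i ≤ m → j ≤ m →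
    ((pvAWhile prev name m i j bh hf).1 =
        ((pvSig ((prev.take m).drop i)).zip (pvSig ((name.take m).drop j))).all (fun ab => ab.1 == ab.2)
     ∧ pvAScanHard prev (pvAWhile prev name m i j bh hf).2.2.2.1 m (pvAWhile prev name m i j bh hf).2.1
         = (bh || ((prev.take m).drop i).any (fun c => pvHardSet.contains c))
     ∧ pvAScanHard name (pvAWhile prev name m i j bh hf).2.2.2.2 m (pvAWhile prev name m i j bh hf).2.2.1
         = (hf || ((name.take m).drop j).any (fun c => pvHardSet.contains c))) := by
  intro i j bh hf
  induction i, j, bh, hf using pvAWhile.induct (prev := prev) (name := name) (m := m) with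
  | case1 i j bh hf h hc ih =>
    intro hi hj
    simp only [List.contains_iff_mem, List.getD] at hc ⊢
    have hwr : pvAWhile prev name m i j bh hf = pvAWhile prev name m i (j+1) bh true := by
      rw [pvAWhile]; simp [h, hc]
    obtain ⟨A1, A2, A3⟩ := ih (by omega) (by omega)
    rw [hwr, pv_seg_cons name m j h.2 hn, pvSig_cons]
    refine ⟨by rw [A1]; simp [hc], A2, ?_⟩
    rw [A3]; simp [List.any_cons, hc]
  | case2 i j bh hf h hc hcp ih =>
    intro hi hj
    simp only [List.contains_iff_mem, List.getD] at hc hcp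
    have hwr : pvAWhile prev name m i j bh hf = pvAWhile prev name m (i+1) j true hf := by
      rw [pvAWhile]; simp [h, hc, hcp]
    obtain ⟨A1, A2, A3⟩ := ih (by omega) (by omega)
    rw [hwr, pv_seg_cons prev m i h.1 hp, pvSig_cons]
    refine ⟨by rw [A1]; simp [hcp], ?_, A3⟩
    rw [A2]; simp [List.any_cons, hcp]
  | case3 i j bh hf h hc hcp hs ih =>
    intro hi hj
    simp only [List.contains_iff_mem, List.getD] at hc hcp hs
    have hwr : pvAWhile prev name m i j bh hf = pvAWhile prev name m i (j+1) bh hf := by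
      rw [pvAWhile]; simp [h, hc, hcp, hs, (by decide : ' ' ∉ pvHardSet)]
    obtain ⟨A1, A2, A3⟩ := ih (by omega) (by omega)
    rw [hwr, pv_seg_cons name m j h.2 hn, pvSig_cons]
    refine ⟨by rw [A1]; simp [hs], A2, ?_⟩
    rw [A3]; simp [List.any_cons, hc, hs, (by decide : ' ' ∉ pvHardSet)]
  | case4 i j bh hf h hc hcp hs hps ih =>
    intro hi hj
    simp only [List.contains_iff_mem, List.getD] at hc hcp hs hps
    have hwr : pvAWhile prev name m i j bh hf = pvAWhile prev name m (i+1) j bh hf := by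
      rw [pvAWhile]; simp [h, hc, hcp, hs, hps, (by decide : ' ' ∉ pvHardSet)]
    obtain ⟨A1, A2, A3⟩ := ih (by omega) (by omega)
    rw [hwr, pv_seg_cons prev m i h.1 hp, pvSig_cons]
    refine ⟨by rw [A1]; simp [hps], ?_, A3⟩
    rw [A2]; simp [List.any_cons, hcp, hps, (by decide : ' ' ∉ pvHardSet)]
  | case5 i j bh hf h hc hcp hs hps hne =>
    intro hi hj
    simp only [List.contains_iff_mem, List.getD] at hc hcp hs hps hne
    have hwr : pvAWhile prev name m i j bh hf = (false, bh, hf, i, j) := by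
      rw [pvAWhile]; simp [h, hc, hcp, hs, hps, hne]
    rw [hwr]
    refine ⟨?_, ?_, ?_⟩
    · rw [pv_seg_cons prev m i h.1 hp, pv_seg_cons name m j h.2 hn, pvSig_cons, pvSig_cons]
      simp [hc, hcp, hs, hps, List.all_cons]
      intro hEq
      exact absurd hEq hne
    · exact pv_scan_spec prev m hp (m - i) i bh rfl (by omega)
    · exact pv_scan_spec name m hn (m - j) j hf rfl (by omega)
  | case6 i j bh hf h hc hcp hs hps hne ih =>
    intro hi hj
    simp only [List.contains_iff_mem, List.getD] at hc hcp hs hps hne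
    have hwr : pvAWhile prev name m i j bh hf = pvAWhile prev name m (i+1) (j+1) bh hf := by
      rw [pvAWhile]; simp [h, hc, hcp, hs, hps, hne, (by decide : ' ' ∉ pvHardSet)]
    obtain ⟨A1, A2, A3⟩ := ih (by omega) (by omega)
    rw [hwr, pv_seg_cons prev m i h.1 hp, pv_seg_cons name m j h.2 hn, pvSig_cons, pvSig_cons]
    refine ⟨?_, ?_, ?_⟩
    · rw [A1]; simp [hc, hcp, hs, hps, List.all_cons, hne]
      exact fun _ => not_not.mp hne
    · rw [A2]; simp [List.any_cons, hcp, hps]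
    · rw [A3]; simp [List.any_cons, hc, hs]
  | case7 i j bh hf h =>
    intro hi hj
    have hwr : pvAWhile prev name m i j bh hf = (true, bh, hf, i, j) := by
      rw [pvAWhile]; simp [h]
    rw [hwr]
    have hij : i = m ∨ j = m := by omega
    refine ⟨?_, pv_scan_spec prev m hp (m - i) i bh rfl (by omega),
            pv_scan_spec name m hn (m - j) j hf rfl (by omega)⟩
    rcases hij with hh | hh
    · rw [hh, pv_seg_nil prev m hp]; simp [pvSig]
    · rw [hh, pv_seg_nil name m hn]; simp [pvSig]

theorem pv_inner_eq (name : List Char) (answer : List (List Char × Bool)) :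
    ∀ (fuel x : Nat) (master : Bool), answer.length - x ≤ fuel →
    pvAInner name answer x master =
      ((pvBLoop name answer x (!master)).1, !(pvBLoop name answer x (!master)).2) := by
  intro fuel
  induction fuel with
  | zero =>
    intro x master hf
    have hx : ¬ x < answer.length := by omega
    rw [pvAInner, pvBLoop]
    simp [hx]
  | succ n ih =>
    intro x master hf
    by_cases hx : x < answer.length
    · have hm1 : min (answer[x].1.length) name.length ≤ answer[x].1.length := Nat.min_le_left _ _
      have hm2 : min (answer[x].1.length) name.length ≤ name.length := Nat.min_le_right _ _
      obtain ⟨W1, W2, W3⟩ := pv_while_spec answer[x].1 name _ hm1 hm2 0 0 false false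
        (Nat.zero_le _) (Nat.zero_le _)
      simp only [List.drop_zero] at W1 W2 W3
      simp only [Bool.false_or] at W2 W3
      have hPB := pv_hard_fun_eq
      rw [pvAInner, pvBLoop]
      simp only [dif_pos hx, hPB]
      rw [← W1, ← W2, ← W3]
      rw [ih (x+1) false (by omega), ih (x+1) master (by omega)]
      split_ifs <;> simp
    · rw [pvAInner, pvBLoop]
      simp [hx]

theorem pv_mem_hard (c : Char) : (c ∈ pvHARD) = (c ∈ pvHardSet) := by rw [pv_hard_eq]

theorem pv_phase1_eq (names : List (List Char)) (answer : List (List Char × Bool)) :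
    pvAPhase1 answer names = names.foldl pvBStep answer := by
  induction names generalizing answer with
  | nil => simp [pvAPhase1]
  | cons name rest ih =>
    rw [pvAPhase1, List.foldl_cons]
    by_cases h0 : answer.length = 0
    · have ha : answer = [] := List.length_eq_zero_iff.mp h0
      subst ha
      rw [if_pos h0, ih]
      congr 1
      have hb : pvBLoop name [] 0 false = ([], false) := by rw [pvBLoop]; simp
      simp [pvBStep, hb, pvAFirstHard, pv_mem_hard]
    · rw [if_neg h0, pv_inner_eq name answer answer.length 0 true (by omega)]
      simp only [Bool.not_true]
      by_cases hb : (pvBLoop name answer 0 false).2 <;>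
        simp [hb, pvBStep, pvAFirstHard, pv_mem_hard, ih]

-- ----- phase 2: keys and the stability bridge -----
def pvEntK1 (e : List Char × Bool) : Int := if e.2 then 0 else 1
def pvEntK2 (e : List Char × Bool) : Int := -(e.1.length : Int)
def pvK (p : (List Char × Bool) × Nat) : Lex (Int × Lex (Int × Nat)) :=
  toLex (pvEntK1 p.1, toLex (pvEntK2 p.1, p.2))

theorem pvK_lt_iff (x y : List Char × Bool) (n m : Nat) :
    pvK (x, n) < pvK (y, m) ↔
      (pvEntK1 x < pvEntK1 y ∨ (pvEntK1 x = pvEntK1 y ∧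
        (pvEntK2 x < pvEntK2 y ∨ (pvEntK2 x = pvEntK2 y ∧ n < m)))) := by
  simp [pvK, Prod.Lex.lt_iff]

theorem pvK_le_iff (x y : List Char × Bool) (n m : Nat) :
    pvK (x, n) ≤ pvK (y, m) ↔
      (pvEntK1 x < pvEntK1 y ∨ (pvEntK1 x = pvEntK1 y ∧
        (pvEntK2 x < pvEntK2 y ∨ (pvEntK2 x = pvEntK2 y ∧ n ≤ m)))) := by
  simp [pvK, Prod.Lex.le_iff, Prod.Lex.lt_iff]

theorem pvK_inj_snd {a b : (List Char × Bool) × Nat} (h : pvK a = pvK b) : a.2 = b.2 := by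
  simp only [pvK, toLex_inj, Prod.mk.injEq] at h
  exact h.2.2

theorem pv_blt_eq (x y : List Char × Bool) (n m : Nat) (h : m < n) :
    (decide (pvK (x, n) < pvK (y, m))) =
      (decide (pvEntK1 x < pvEntK1 y) || (!decide (pvEntK1 y < pvEntK1 x) && decide (pvEntK2 x < pvEntK2 y))) := by
  by_cases h1 : pvEntK1 x < pvEntK1 y <;> by_cases h2 : pvEntK1 y < pvEntK1 x <;>
    by_cases h3 : pvEntK2 x < pvEntK2 y <;> simp [pvK_lt_iff, h1, h2, h3] <;> omega

theorem pv_stab_insert (x : List Char × Bool) (n : Nat) :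
    ∀ (acc : List ((List Char × Bool) × Nat)), (∀ p ∈ acc, p.2 < n) →
    (PySem.List.insertBy (fun a b => decide (pvK a < pvK b)) (x, n) acc).map Prod.fst =
      PySem.List.insertBy
        (fun a b => decide (pvEntK1 a < pvEntK1 b) || (!decide (pvEntK1 b < pvEntK1 a) && decide (pvEntK2 a < pvEntK2 b)))
        x (acc.map Prod.fst) := by
  intro acc
  induction acc with
  | nil => intro _; simp [PySem.List.insertBy]
  | cons y ys ih =>
    intro hidx
    have hy : y.2 < n := hidx y (List.mem_cons_self)
    have hblt := pv_blt_eq x y.1 n y.2 hy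
    simp only [PySem.List.insertBy, List.map_cons]
    rw [show ((y.1, y.2) : (List Char × Bool) × Nat) = y from rfl] at hblt
    simp only [hblt]
    by_cases hc : (decide (pvEntK1 x < pvEntK1 y.1) || (!decide (pvEntK1 y.1 < pvEntK1 x) && decide (pvEntK2 x < pvEntK2 y.1))) = true
    · simp [hc]
    · simp only [Bool.not_eq_true] at hc
      simp [hc, ih (fun p hp => hidx p (List.mem_cons_of_mem _ hp))]

theorem pv_stab (l : List (List Char × Bool)) :
    ∀ (n : Nat) (acc : List ((List Char × Bool) × Nat)), (∀ p ∈ acc, p.2 < n) →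
    ((l.zipIdx n).foldl (fun a q => PySem.List.insertBy (fun a b => decide (pvK a < pvK b)) q a) acc).map Prod.fst =
      l.foldl (fun a e => PySem.List.insertBy
        (fun a b => decide (pvEntK1 a < pvEntK1 b) || (!decide (pvEntK1 b < pvEntK1 a) && decide (pvEntK2 a < pvEntK2 b)))
        e a) (acc.map Prod.fst) := by
  induction l with
  | nil => intro n acc _; simp
  | cons x t ih =>
    intro n acc hidx
    simp only [List.zipIdx_cons, List.foldl_cons]
    rw [ih (n+1) _ (fun p hp => by
      rcases (PySem.List.mem_insertBy _ _ _ _).mp hp with h | h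
      · subst h; omega
      · exact Nat.lt_succ_of_lt (hidx p h))]
    rw [pv_stab_insert x n acc hidx]

theorem pv_sorted2_eq (l : List (List Char × Bool)) :
    PySem.List.sorted2 l (fun e => if e.2 then (0 : Int) else 1) (fun e => -(e.1.length : Int)) =
      (PySem.List.sorted (l.zipIdx) pvK).map Prod.fst := by
  rw [PySem.List.sorted_eq_foldl_insertBy]
  have h := pv_stab l 0 [] (by simp)
  simp only [List.map_nil] at h
  rw [h]
  rfl

-- ----- phase 2: facts about the sorted index list -----
theorem pv_zipIdx_set {α : Type} (l : List α) (p : Nat) (b : α) :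
    ((l.set p b).zipIdx) = (l.zipIdx).map (fun q => if q.2 = p then (b, q.2) else q) := by
  apply List.ext_getElem
  · simp
  · intro i h1 h2
    simp only [List.getElem_zipIdx, List.getElem_map]
    have hi : i < l.length := by simp at h1; omega
    simp only [List.getElem_set]
    by_cases hip : i = p
    · simp [hip]
    · simp [hip, Ne.symm hip]

theorem pv_zipIdx_snd {α : Type} (l : List α) : (l.zipIdx).map Prod.snd = List.range' 0 l.length := by
  apply List.ext_getElem <;> simp

theorem pv_sorted_nodup_snd (l : List (List Char × Bool)) :
    ((PySem.List.sorted (l.zipIdx) pvK).map Prod.snd).Nodup := by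
  have hperm := PySem.List.sorted_perm (l.zipIdx) pvK false
  have hn : ((l.zipIdx).map Prod.snd).Nodup := by
    rw [pv_zipIdx_snd]; exact List.nodup_range' 1
  exact ((hperm.map Prod.snd).symm).nodup hn

theorem pv_sorted_pairwise_lt (l : List (List Char × Bool)) :
    (PySem.List.sorted (l.zipIdx) pvK).Pairwise (fun a b => pvK a < pvK b) := by
  have h1 := PySem.List.sorted_pairwise (l.zipIdx) pvK
  have h2 : (PySem.List.sorted (l.zipIdx) pvK).Pairwise (fun a b => a.2 ≠ b.2) := by
    rw [← List.pairwise_map (f := Prod.snd)]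
    exact pv_sorted_nodup_snd l
  exact (h1.and h2).imp (fun {a b} h => lt_of_le_of_ne h.1 (fun he => h.2 (pvK_inj_snd he)))

-- ----- phase 2: the selection scan finds the pvK-minimal element -----
def pvScanInv (q : List (List Char × Bool)) (s : Bool × Nat × Nat) : Prop :=
  (q = [] → s = (false, 0, 0)) ∧
  (q ≠ [] →
    s.2.2 < q.length ∧
    s.1 = (q.getD s.2.2 ([], false)).2 ∧
    s.2.1 = (q.getD s.2.2 ([], false)).1.length ∧
    ∀ i, i < q.length → pvK (q.getD s.2.2 ([], false), s.2.2) ≤ pvK (q.getD i ([], false), i))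

theorem pvEntK1_cases (e : List Char × Bool) : (e.2 = true ∧ pvEntK1 e = 0) ∨ (e.2 = false ∧ pvEntK1 e = 1) := by
  by_cases h : e.2 <;> simp [pvEntK1, h]

theorem pv_scan_inv (q : List (List Char × Bool)) : pvScanInv q (pvAScan q) := by
  induction q using List.reverseRecOn with
  | nil =>
    constructor
    · intro _; simp [pvAScan]
    · intro h; exact absurd rfl h
  | append_singleton q x ih =>
    have hsplit : pvAScan (q ++ [x]) = pvAScanStep (pvAScan q) (x, q.length) := by
      unfold pvAScan
      rw [List.zipIdx_append, List.foldl_append]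
      simp
    rw [hsplit]
    obtain ⟨hnil, hcons⟩ := ih
    have hgetD_new : (q ++ [x]).getD q.length ([], false) = x := by
      rw [List.getD_eq_getElem _ _ (by simp)]
      simp
    have hgetD_old : ∀ i, i < q.length → (q ++ [x]).getD i ([], false) = q.getD i ([], false) := by
      intro i hi
      rw [List.getD_eq_getElem _ _ (by simp; omega), List.getD_eq_getElem _ _ hi,
        List.getElem_append_left hi]
    constructor
    · intro h; simp at h
    · intro _
      by_cases hq : q = []
      · subst hq
        rw [hnil rfl]
        simp only [pvAScanStep]
        rcases pvEntK1_cases x with ⟨hx2, hk1⟩ | ⟨hx2, hk1⟩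
        · simp only [hx2]
          refine ⟨by simp, by simp [hgetD_new, hx2], by simp [hgetD_new], ?_⟩
          intro i hi
          have : i = 0 := by simp at hi; omega
          subst this
          simp [hgetD_new]
        · simp only [hx2]
          by_cases hlen : (0 : Nat) < x.1.length
          · simp only [Bool.false_and, Bool.and_false, Bool.false_eq_true, if_false,
              Bool.not_false, Bool.true_and, hlen, decide_true, if_true]
            refine ⟨by simp, by simp [hgetD_new, hx2], by simp [hgetD_new], ?_⟩
            intro i hi
            have : i = 0 := by simp at hi; omega
            subst this
            simp [hgetD_new]
          · have hx0 : x.1.length = 0 := by omega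
            simp only [Bool.false_and, Bool.and_false, Bool.false_eq_true, if_false,
              Bool.not_false, Bool.true_and, hlen, decide_false, if_false]
            refine ⟨by simp, by simp [hgetD_new, hx2], by simp [hgetD_new, hx0], ?_⟩
            intro i hi
            have : i = 0 := by simp at hi; omega
            subst this
            simp [hgetD_new]
      · obtain ⟨hpt, hflag, hlen, hmin⟩ := hcons hq
        set s := pvAScan q with hs
        have hK2x : pvEntK2 x = -(x.1.length : Int) := rfl
        have hK2q : pvEntK2 (q.getD s.2.2 ([], false)) = -((q.getD s.2.2 ([], false)).1.length : Int) := rfl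
        rcases pvEntK1_cases x with ⟨hx2, hk1⟩ | ⟨hx2, hk1⟩ <;>
          rcases hsf : s.1 with _ | _
        · -- x flagged, state unflagged: branch 1 fires
          have hstep : pvAScanStep s (x, q.length) = (true, x.1.length, q.length) := by
            simp [pvAScanStep, hx2, hsf]
          rw [hstep]
          have hqpt1 : pvEntK1 (q.getD s.2.2 ([], false)) = 1 := by
            rcases pvEntK1_cases (q.getD s.2.2 ([], false)) with ⟨h2, hk⟩ | ⟨h2, hk⟩
            · rw [← hflag, hsf] at h2; cases h2
            · exact hk
          refine ⟨by simp, by simp [hgetD_new, hx2], by simp [hgetD_new], ?_⟩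
          intro i hi
          rw [hgetD_new]
          rcases (by simp at hi; omega : i = q.length ∨ i < q.length) with hiq | hiq
          · subst hiq; rw [hgetD_new]
          · rw [hgetD_old i hiq]
            have hle := hmin i hiq
            rcases pvEntK1_cases (q.getD i ([], false)) with ⟨_, hki⟩ | ⟨_, hki⟩
            · rw [pvK_le_iff] at hle; omega
            · rw [pvK_le_iff]; omega
        · -- x flagged, state flagged
          have hqpt1 : pvEntK1 (q.getD s.2.2 ([], false)) = 0 := by
            rcases pvEntK1_cases (q.getD s.2.2 ([], false)) with ⟨h2, hk⟩ | ⟨h2, hk⟩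
            · exact hk
            · rw [← hflag, hsf] at h2; cases h2
          by_cases hgt : s.2.1 < x.1.length
          · have hstep : pvAScanStep s (x, q.length) = (true, x.1.length, q.length) := by
              simp [pvAScanStep, hx2, hsf, hgt]
            rw [hstep]
            refine ⟨by simp, by simp [hgetD_new, hx2], by simp [hgetD_new], ?_⟩
            intro i hi
            rw [hgetD_new]
            rcases (by simp at hi; omega : i = q.length ∨ i < q.length) with hiq | hiq
            · subst hiq; rw [hgetD_new]
            · rw [hgetD_old i hiq]
              refine le_trans ?_ (hmin i hiq)
              rw [pvK_le_iff]
              rw [hlen] at hgt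
              omega
          · have hstep : pvAScanStep s (x, q.length) = s := by
              simp [pvAScanStep, hx2, hsf, hgt]
            rw [hstep]
            refine ⟨by simp; omega, by rw [hgetD_old _ hpt]; exact hflag,
              by rw [hgetD_old _ hpt]; exact hlen, ?_⟩
            intro i hi
            rw [hgetD_old _ hpt]
            rcases (by simp at hi; omega : i = q.length ∨ i < q.length) with hiq | hiq
            · subst hiq
              rw [hgetD_new, pvK_le_iff]
              rw [hlen] at hgt
              omega
            · rw [hgetD_old i hiq]; exact hmin i hiq
        · -- x unflagged, state unflagged
          have hqpt1 : pvEntK1 (q.getD s.2.2 ([], false)) = 1 := by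
            rcases pvEntK1_cases (q.getD s.2.2 ([], false)) with ⟨h2, hk⟩ | ⟨h2, hk⟩
            · rw [← hflag, hsf] at h2; cases h2
            · exact hk
          by_cases hgt : s.2.1 < x.1.length
          · have hstep : pvAScanStep s (x, q.length) = (false, x.1.length, q.length) := by
              simp [pvAScanStep, hx2, hsf, hgt]
            rw [hstep]
            refine ⟨by simp, by simp [hgetD_new, hx2], by simp [hgetD_new], ?_⟩
            intro i hi
            rw [hgetD_new]
            rcases (by simp at hi; omega : i = q.length ∨ i < q.length) with hiq | hiq
            · subst hiq; rw [hgetD_new]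
            · rw [hgetD_old i hiq]
              refine le_trans ?_ (hmin i hiq)
              rw [pvK_le_iff]
              rw [hlen] at hgt
              omega
          · have hstep : pvAScanStep s (x, q.length) = s := by
              simp [pvAScanStep, hx2, hsf, hgt]
            rw [hstep]
            refine ⟨by simp; omega, by rw [hgetD_old _ hpt]; exact hflag,
              by rw [hgetD_old _ hpt]; exact hlen, ?_⟩
            intro i hi
            rw [hgetD_old _ hpt]
            rcases (by simp at hi; omega : i = q.length ∨ i < q.length) with hiq | hiq
            · subst hiq
              rw [hgetD_new, pvK_le_iff]
              rw [hlen] at hgt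
              omega
            · rw [hgetD_old i hiq]; exact hmin i hiq
        · -- x unflagged, state flagged: nothing changes
          have hqpt1 : pvEntK1 (q.getD s.2.2 ([], false)) = 0 := by
            rcases pvEntK1_cases (q.getD s.2.2 ([], false)) with ⟨h2, hk⟩ | ⟨h2, hk⟩
            · exact hk
            · rw [← hflag, hsf] at h2; cases h2
          have hstep : pvAScanStep s (x, q.length) = s := by
            simp [pvAScanStep, hx2, hsf]
          rw [hstep]
          refine ⟨by simp; omega, by rw [hgetD_old _ hpt]; exact hflag,
            by rw [hgetD_old _ hpt]; exact hlen, ?_⟩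
          intro i hi
          rw [hgetD_old _ hpt]
          rcases (by simp at hi; omega : i = q.length ∨ i < q.length) with hiq | hiq
          · subst hiq
            rw [hgetD_new, pvK_le_iff]
            omega
          · rw [hgetD_old i hiq]; exact hmin i hiq

-- ----- phase 2: head of the sorted list = the scan's point; blanking = moving it to the tail -----
theorem pv_bot_lt_names {q : (List Char × Bool) × Nat} {pt : Nat}
    (h : pvK ((([] : List Char), false), pt) < pvK q) : q.1.1 = [] := by
  have h' := (pvK_lt_iff ([], false) q.1 pt q.2).mp h
  rcases pvEntK1_cases q.1 with ⟨_, hk⟩ | ⟨_, hk⟩ <;>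
  · have h1 : pvEntK1 (([] : List Char), false) = 1 := by simp [pvEntK1]
    have h2 : pvEntK2 (([] : List Char), false) = 0 := by simp [pvEntK2]
    have h3 : pvEntK2 q.1 = -(q.1.1.length : Int) := rfl
    have : q.1.1.length = 0 := by omega
    exact List.length_eq_zero_iff.mp this

theorem pv_dropWhile_bot_lt (t : List ((List Char × Bool) × Nat)) (pt : Nat)
    (hpw : t.Pairwise (fun a b => pvK a < pvK b)) (hne : ∀ q ∈ t, q.2 ≠ pt) :
    ∀ b ∈ t.dropWhile (fun p => decide (pvK p < pvK ((([] : List Char), false), pt))),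
      pvK ((([] : List Char), false), pt) < pvK b := by
  rcases hd : t.dropWhile (fun p => decide (pvK p < pvK ((([] : List Char), false), pt))) with _ | ⟨b0, rest⟩
  · simp
  · intro b hb
    have hsub := List.dropWhile_sublist (l := t)
      (p := fun p => decide (pvK p < pvK ((([] : List Char), false), pt)))
    rw [hd] at hsub
    have hb0mem : b0 ∈ t := hsub.mem (List.mem_cons_self)
    have hb0n : ¬ (pvK b0 < pvK ((([] : List Char), false), pt)) := by
      have := List.head?_dropWhile_not
        (fun p => decide (pvK p < pvK ((([] : List Char), false), pt))) t
      rw [hd] at this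
      simpa using this
    have hb0ne : pvK ((([] : List Char), false), pt) ≠ pvK b0 := by
      intro he
      exact hne b0 hb0mem ((pvK_inj_snd he.symm) ▸ rfl)
    have hlt0 : pvK ((([] : List Char), false), pt) < pvK b0 :=
      lt_of_le_of_ne (not_lt.mp hb0n) hb0ne
    rcases List.mem_cons.mp hb with rfl | hbr
    · exact hlt0
    · have hpw2 : (b0 :: rest).Pairwise (fun a b => pvK a < pvK b) := hpw.sublist hsub
      exact lt_trans hlt0 ((List.pairwise_cons.mp hpw2).1 b hbr)

theorem pv_sorted_head (l : List (List Char × Bool)) (hl : l ≠ []) :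
    PySem.List.sorted (l.zipIdx) pvK =
      (l.getD (pvAScan l).2.2 ([], false), (pvAScan l).2.2) ::
        (PySem.List.sorted (l.zipIdx) pvK).tail := by
  obtain ⟨-, hc⟩ := pv_scan_inv l
  obtain ⟨hpt, -, -, hmin⟩ := hc hl
  rcases hS : PySem.List.sorted (l.zipIdx) pvK with _ | ⟨h0, t⟩
  · exfalso
    have := (PySem.List.sorted_eq_nil_iff (l.zipIdx) pvK false).mp hS
    have hlen : l.length = 0 := by
      have := congrArg List.length this
      simpa using this
    exact hl (List.length_eq_zero_iff.mp hlen)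
  · have hmem : h0 ∈ PySem.List.sorted (l.zipIdx) pvK := by rw [hS]; exact List.mem_cons_self
    have hmemz : h0 ∈ l.zipIdx := (PySem.List.mem_sorted _ _ _ _).mp hmem
    obtain ⟨-, hlt, hval⟩ := List.mem_zipIdx (show (h0.1, h0.2) ∈ l.zipIdx from hmemz)
    have hlt' : h0.2 < l.length := by omega
    have hmem_pt : (l[(pvAScan l).2.2]'hpt, (pvAScan l).2.2) ∈ l.zipIdx := by
      have hg := List.getElem_zipIdx (l := l) (j := 0) (i := (pvAScan l).2.2)
        (h := by rw [List.length_zipIdx]; exact hpt)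
      rw [Nat.zero_add] at hg
      rw [← hg]
      exact List.getElem_mem _
    have h1 : pvK h0 ≤ pvK (l[(pvAScan l).2.2]'hpt, (pvAScan l).2.2) :=
      PySem.List.key_head_sorted_le (l.zipIdx) pvK hS _ hmem_pt
    have h2 := hmin h0.2 hlt'
    rw [List.getD_eq_getElem _ _ hpt, List.getD_eq_getElem _ _ hlt'] at h2
    have hv : h0 = (l[h0.2]'hlt', h0.2) := by
      have : h0.1 = l[h0.2]'hlt' := by simpa using hval
      exact Prod.ext this rfl
    rw [← hv] at h2
    have hKeq : pvK h0 = pvK (l[(pvAScan l).2.2]'hpt, (pvAScan l).2.2) := le_antisymm h1 h2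
    have hsnd : h0.2 = (pvAScan l).2.2 := pvK_inj_snd hKeq
    simp only [List.tail_cons]
    congr 1
    rw [List.getD_eq_getElem _ _ hpt, hv]
    simp [hsnd]

theorem pv_tail_snd_ne (l : List (List Char × Bool)) (hl : l ≠ []) :
    ∀ q ∈ (PySem.List.sorted (l.zipIdx) pvK).tail, q.2 ≠ (pvAScan l).2.2 := by
  have hnd := pv_sorted_nodup_snd l
  rw [pv_sorted_head l hl] at hnd
  simp only [List.map_cons, List.nodup_cons] at hnd
  intro q hq he
  exact hnd.1 (he ▸ List.mem_map_of_mem hq)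

theorem pv_sorted_set (l : List (List Char × Bool)) (hl : l ≠ []) :
    PySem.List.sorted ((l.set (pvAScan l).2.2 ([], false)).zipIdx) pvK =
      ((PySem.List.sorted (l.zipIdx) pvK).tail).takeWhile
          (fun p => decide (pvK p < pvK ((([] : List Char), false), (pvAScan l).2.2))) ++
        ((([] : List Char), false), (pvAScan l).2.2) ::
        ((PySem.List.sorted (l.zipIdx) pvK).tail).dropWhile
          (fun p => decide (pvK p < pvK ((([] : List Char), false), (pvAScan l).2.2))) := by
  set pt := (pvAScan l).2.2 with hptdef
  set t := (PySem.List.sorted (l.zipIdx) pvK).tail with htdef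
  set Bp := fun p => decide (pvK p < pvK ((([] : List Char), false), pt)) with hBp
  have hpw : (PySem.List.sorted (l.zipIdx) pvK).Pairwise (fun a b => pvK a < pvK b) :=
    pv_sorted_pairwise_lt l
  have hhead := pv_sorted_head l hl
  have hne := pv_tail_snd_ne l hl
  rw [← hptdef] at hhead hne
  rw [← htdef] at hhead hne
  have htpw : t.Pairwise (fun a b => pvK a < pvK b) := by
    exact (List.pairwise_cons.mp (hhead ▸ hpw)).2
  apply PySem.List.sorted_eq_of_perm_of_pairwise_lt
  · -- permutation
    have hset : (l.set pt ([], false)).zipIdx =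
        (l.zipIdx).map (fun q => if q.2 = pt then (([], false), q.2) else q) :=
      pv_zipIdx_set l pt ([], false)
    have hperm1 : ((l.zipIdx).map (fun q => if q.2 = pt then ((([] : List Char), false), q.2) else q)).Perm
        ((PySem.List.sorted (l.zipIdx) pvK).map (fun q => if q.2 = pt then ((([] : List Char), false), q.2) else q)) :=
      ((PySem.List.sorted_perm (l.zipIdx) pvK false).symm).map _
    have hmapS : (PySem.List.sorted (l.zipIdx) pvK).map
        (fun q => if q.2 = pt then ((([] : List Char), false), q.2) else q) =
        ((([] : List Char), false), pt) :: t := by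
      rw [hhead]
      simp only [List.map_cons, if_pos rfl]
      congr 1
      have hmm : ∀ q ∈ t, (if q.2 = pt then ((([] : List Char), false), q.2) else q) = id q :=
        fun q hq => by rw [if_neg (hne q hq)]; rfl
      rw [List.map_congr_left hmm, List.map_id]
    rw [hset]
    refine List.Perm.trans ?_ hperm1.symm
    rw [hmapS]
    have hsplit : t.takeWhile Bp ++ t.dropWhile Bp = t := List.takeWhile_append_dropWhile
    have hmid := List.perm_middle (a := ((([] : List Char), false), pt))
      (l₁ := t.takeWhile Bp) (l₂ := t.dropWhile Bp)
    rw [hsplit] at hmid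
    exact hmid
  · -- pairwise
    have h1 : (t.takeWhile Bp).Pairwise (fun a b => pvK a < pvK b) :=
      htpw.sublist (List.takeWhile_sublist _)
    have h2 : (t.dropWhile Bp).Pairwise (fun a b => pvK a < pvK b) :=
      htpw.sublist (List.dropWhile_sublist _)
    have hbot : ∀ b ∈ t.dropWhile Bp, pvK ((([] : List Char), false), pt) < pvK b :=
      pv_dropWhile_bot_lt t pt htpw hne
    rw [List.pairwise_append]
    refine ⟨h1, ?_, ?_⟩
    · rw [List.pairwise_cons]
      exact ⟨hbot, h2⟩
    · intro a ha b hb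
      have haB : Bp a = true := List.mem_takeWhile_imp ha
      have halt : pvK a < pvK ((([] : List Char), false), pt) := by
        rw [hBp] at haB
        simpa using haB
      rcases List.mem_cons.mp hb with rfl | hb2
      · exact halt
      · exact lt_trans halt (hbot b hb2)

theorem pv_take_rep (xs : List (List Char)) (r k : Nat) (hk : k ≤ xs.length + r) :
    (xs ++ List.replicate (r+1) ([] : List Char)).take k = (xs ++ List.replicate r ([] : List Char)).take k := by
  rw [List.take_append, List.take_append, List.take_replicate, List.take_replicate]
  congr 2
  omega

theorem pv_names_eq (l : List (List Char × Bool)) (hl : l ≠ []) (k : Nat)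
    (hk : k ≤ ((PySem.List.sorted (l.zipIdx) pvK).tail).length) :
    (((PySem.List.sorted ((l.set (pvAScan l).2.2 ([], false)).zipIdx) pvK).map (fun p => p.1.1)).take k) =
      ((((PySem.List.sorted (l.zipIdx) pvK).tail).map (fun p => p.1.1)).take k) := by
  rw [pv_sorted_set l hl]
  set pt := (pvAScan l).2.2 with hptdef
  set t := (PySem.List.sorted (l.zipIdx) pvK).tail with htdef
  set Bp := fun p => decide (pvK p < pvK ((([] : List Char), false), pt)) with hBp
  have htpw : t.Pairwise (fun a b => pvK a < pvK b) := by
    have hpw := pv_sorted_pairwise_lt l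
    rw [pv_sorted_head l hl] at hpw
    exact (List.pairwise_cons.mp hpw).2
  have hne := pv_tail_snd_ne l hl
  have hbot : ∀ b ∈ t.dropWhile Bp, pvK ((([] : List Char), false), pt) < pvK b :=
    pv_dropWhile_bot_lt t pt htpw hne
  have hrep : (t.dropWhile Bp).map (fun p => p.1.1) =
      List.replicate ((t.dropWhile Bp).length) ([] : List Char) := by
    rw [show ((t.dropWhile Bp).length) = ((t.dropWhile Bp).map (fun p => p.1.1)).length from by simp]
    apply List.eq_replicate_of_mem
    intro b hb
    obtain ⟨q, hq, rfl⟩ := List.mem_map.mp hb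
    exact pv_bot_lt_names (hbot q hq)
  have hsplit : t.takeWhile Bp ++ t.dropWhile Bp = t := List.takeWhile_append_dropWhile
  conv_rhs => rw [← hsplit]
  rw [List.map_append, List.map_append, List.map_cons, hrep]
  rw [show (([] : List Char) :: List.replicate ((t.dropWhile Bp).length) ([] : List Char)) =
    List.replicate ((t.dropWhile Bp).length + 1) ([] : List Char) from rfl]
  apply pv_take_rep
  have := congrArg List.length hsplit
  simp only [List.length_append] at this
  simp only [List.length_map]
  omega

theorem pv_phase2_take : ∀ (k : Nat) (l : List (List Char × Bool)) (total : List (List Char)),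
    k ≤ l.length →
    pvAPhase2 l k total =
      total ++ ((PySem.List.sorted (l.zipIdx) pvK).map (fun p => p.1.1)).take k := by
  intro k
  induction k with
  | zero => intro l total _; simp [pvAPhase2]
  | succ k ih =>
    intro l total hk
    have hl : l ≠ [] := by
      intro h; subst h; simp at hk
    rw [pvAPhase2]
    rw [ih (l.set (pvAScan l).2.2 ([], false)) _ (by simp; omega)]
    have hslen : (PySem.List.sorted (l.zipIdx) pvK).length = l.length := by
      rw [PySem.List.length_sorted, List.length_zipIdx]
    have htlen : ((PySem.List.sorted (l.zipIdx) pvK).tail).length = l.length - 1 := by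
      rw [List.length_tail, hslen]
    rw [pv_names_eq l hl k (by omega)]
    conv_rhs => rw [pv_sorted_head l hl]
    rw [List.map_cons, List.take_succ_cons]
    simp [List.append_assoc]

theorem pv_phase2_eq (answer : List (List Char × Bool)) :
    pvAPhase2 answer answer.length [] =
      (PySem.List.sorted2 answer (fun e => if e.2 then (0 : Int) else 1)
        (fun e => -(e.1.length : Int))).map (fun e => e.1) := by
  rw [pv_phase2_take answer.length answer [] le_rfl, pv_sorted2_eq, List.nil_append, List.map_map]
  rw [List.take_of_length_le (by simp [PySem.List.length_sorted])]
  rfl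

-- ===== VERDICT (by name: the statement is the Claim_ definition above) =====
theorem solution_spec : Claim_equal_solution := by
  intro merchantNames _
  show _ = _
  simp only [solution, solution_alt]
  rw [← pv_phase1_eq, pv_phase2_eq, List.map_map]
  rfl
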